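-- pv_equiv track=rewrite | github.com/zxteloiv/complex-qa | src/exps/2022.sp-struct/scripts/fixed_hardness.py | eval_score
-- ===== SOURCE A (Python) =====
-- from typing import List
--
-- CLAUSE_KEYWORDS = ('select', 'from', 'where', 'group', 'order', 'limit')
--
-- def eval_score(sql: List[str]):
--
--     scores = []
--     for idx, word in enumerate(sql):
--         if word in CLAUSE_KEYWORDS:
--
--             layer = sql[0:idx].count('(') - sql[0:idx].count(')') + 1
--             if layer > 5:
--                 layer = 5
--             next_key_word_index = idx + 1
--
--             while not sql[next_key_word_index] in CLAUSE_KEYWORDS: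
--                 next_key_word_index += 1
--                 if next_key_word_index > len(sql)-1:
--                     break
--
--             if not word == 'where':
--                 count = sql[idx:next_key_word_index].count(',') + 1
--             else:
--                 count = 1
--                 stack = []
--                 for word1 in sql[idx:]:
--                     if word1 == '(':
--                         stack.append(word1)
--                     if word1 == 'select':
--                         stack.append(word1)
--                     if word1 == ')':
--                         if len(stack) == 0:
--                             break
--                         else:
--                             if stack[-1] == 'select':
--                                 stack.pop()
--                                 stack.pop()
--                             elif stack[-1] == '(':
--                                 stack.pop()
--                     if (word1 == 'and' or word1 == 'or') and len(stack) == 0: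
--                         count += 1
--
--
--             if count > 1:
--                 score = 2
--             else:
--                 score = 1
--             scores.append(layer * score)
--
--     return sum(scores)
-- ===== SOURCE B (Python) =====
-- from typing import List
--
-- CLAUSE_KEYWORDS = ('select', 'from', 'where', 'group', 'order', 'limit')
--
-- def _where_complex(sql, idx):
--     # True iff the where-clause contains a top-level 'and'/'or' (count > 1 in A's terms)
--     stack = []
--     for w in sql[idx:]:
--         if w == '(' or w == 'select':
--             stack.append(w)
--         elif w == ')':
--             if not stack:
--                 return False
--             del stack[-2 if stack[-1] == 'select' else -1:]
--         elif (w == 'and' or w == 'or') and not stack: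
--             return True
--     return False
--
-- def eval_score(sql: List[str]):
--     n = len(sql)
--     bal = [0] * (n + 1)
--     comma = [0] * (n + 1)
--     for i, w in enumerate(sql):
--         bal[i + 1] = bal[i] + (w == '(') - (w == ')')
--         comma[i + 1] = comma[i] + (w == ',')
--     kw_pos = [i for i, w in enumerate(sql) if w in CLAUSE_KEYWORDS]
--     total = 0
--     for idx, nxt in zip(kw_pos, kw_pos[1:] + [n]):
--         layer = min(bal[idx] + 1, 5)
--         if sql[idx] != 'where':
--             many = comma[nxt] - comma[idx] > 0
--         else:
--             many = _where_complex(sql, idx)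
--         total += layer * (2 if many else 1)
--     return total
-- ===== Notes on version B (the rewrite author's own statement) =====
-- stated objective: alternative
-- what changed: Replaces A's per-keyword rescans of the prefix (paren counts for the layer, rescans for commas and the next keyword) by one pass building prefix-sum tables of paren balance and comma counts plus a precomputed keyword-position list, and replaces A's where-clause counter by an early-exit boolean scan; it trades A's repeated scans for precomputed tables (better when clause keywords are dense, more per-word bookkeeping when they are sparse).
import Mathlib
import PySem

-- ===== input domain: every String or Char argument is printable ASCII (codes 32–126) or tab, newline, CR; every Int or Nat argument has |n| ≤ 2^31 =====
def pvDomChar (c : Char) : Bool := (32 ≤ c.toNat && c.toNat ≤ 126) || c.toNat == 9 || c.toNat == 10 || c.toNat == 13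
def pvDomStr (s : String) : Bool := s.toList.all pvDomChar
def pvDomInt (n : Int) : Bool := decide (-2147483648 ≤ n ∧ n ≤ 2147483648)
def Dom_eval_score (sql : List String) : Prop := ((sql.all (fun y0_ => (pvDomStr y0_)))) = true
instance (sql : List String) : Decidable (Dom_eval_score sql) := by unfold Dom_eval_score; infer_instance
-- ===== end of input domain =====

-- B is an alternative algorithm: instead of A's per-keyword rescans of the prefix (paren
-- counts for the layer, a rescan for commas and for the next keyword), B builds prefix-sum
-- tables and a keyword-position list in one pass and reads each keyword's data from them,
-- and replaces A's where-clause counter by an early-exit boolean scan.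

-- ===== PORT A =====
def pvKws : List String := ["select", "from", "where", "group", "order", "limit"]

-- A's while loop searching the next clause keyword after j-1; returns sql.length when it runs
-- off the end (the IndexError entry case j = sql.length, i.e. a trailing keyword, is excluded by Pre_).
def pvNextKW (sql : List String) (j : Nat) : Nat :=
  if h : sql.length ≤ j then j
  else if sql[j] ∈ pvKws then j
  else pvNextKW sql (j + 1)
termination_by sql.length - j
decreasing_by omega

-- A's where-clause for-loop; head of `stack` = top of the Python stack.
def pvWhereLoop (ws : List String) (stack : List String) (count : Int) : Int :=
  match ws with
  | [] => count
  | w :: rest =>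
    let s1 := if w = "(" then "(" :: stack else stack
    let s2 := if w = "select" then "select" :: s1 else s1
    if w = ")" then
      match s2 with
      | [] => count                               -- break
      | top :: t =>
        if top = "select" then
          match t with
          | [] => count                           -- Python pops an empty stack here (IndexError); excluded by Pre_
          | _ :: t2 => pvWhereLoop rest t2 count
        else if top = "(" then pvWhereLoop rest t count
        else pvWhereLoop rest s2 count
    else
      pvWhereLoop rest s2 (if (w = "and" ∨ w = "or") ∧ s2 = [] then count + 1 else count)

-- the body of A's outer loop for one keyword index
def pvContribA (sql : List String) (idx : Nat) : Int :=
  let word := sql.getD idx ""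
  let pre := sql.take idx
  let layer0 : Int := (pre.count "(" : Int) - (pre.count ")" : Int) + 1
  let layer := if layer0 > 5 then 5 else layer0
  let nxt := pvNextKW sql (idx + 1)
  let count : Int :=
    if ¬ (word = "where") then (((sql.drop idx).take (nxt - idx)).count "," : Int) + 1
    else pvWhereLoop (sql.drop idx) [] 1
  let score : Int := if count > 1 then 2 else 1
  layer * score

def eval_score (sql : List String) : Int :=
  ((List.range sql.length).foldl (fun scores idx =>
    if sql.getD idx "" ∈ pvKws then scores ++ [pvContribA sql idx] else scores)
    ([] : List Int)).sum

-- ===== PORT B =====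
-- B's where-scan: True iff a top-level 'and'/'or' occurs before an unmatched ')'
def pvWhereComplex (ws : List String) (stack : List String) : Bool :=
  match ws with
  | [] => false
  | w :: rest =>
    if w = "(" ∨ w = "select" then pvWhereComplex rest (w :: stack)
    else if w = ")" then
      match stack with
      | [] => false
      | top :: t => pvWhereComplex rest (if top = "select" then t.drop 1 else t)  -- del stack[-2:] / [-1:]
    else if (w = "and" ∨ w = "or") ∧ stack = [] then true
    else pvWhereComplex rest stack

-- the body of B's loop over keyword positions paired with their successor (or n)
def pvContribB (sql : List String) (bal comma : List Int) (p : Nat × Nat) : Int :=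
  let layer := min (bal.getD p.1 0 + 1) 5
  let many : Bool :=
    if ¬ (sql.getD p.1 "" = "where") then decide (comma.getD p.2 0 - comma.getD p.1 0 > 0)
    else pvWhereComplex (sql.drop p.1) []
  layer * (if many then 2 else 1)

def eval_score_alt (sql : List String) : Int :=
  let n := sql.length
  let bal : List Int := sql.scanl (fun b w => b + (if w = "(" then 1 else 0) - (if w = ")" then 1 else 0)) 0
  let comma : List Int := sql.scanl (fun c w => c + (if w = "," then 1 else 0)) 0
  let kwPos : List Nat := (List.range n).filter (fun i => sql.getD i "" ∈ pvKws)
  (kwPos.zip (kwPos.tail ++ [n])).foldl (fun total q => total + pvContribB sql bal comma q) 0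

-- ===== PRECONDITION & SPEC =====
-- Nesting-discipline state machine on the input tokens (a property of the token sequence only,
-- independent of either port's scan): the markers opened so far (true = a subquery opened by
-- 'select', false = a parenthesis), `some none` once an unmatched ')' closes the clause, and
-- `none` when a ')' closes a subquery marker that has no parenthesis below it — the one shape
-- of input on which A's where-clause bookkeeping pops an empty stack (IndexError).
def pvWhereStep (st : Option (Option (List Bool))) (w : String) : Option (Option (List Bool)) :=
  match st with
  | none => none
  | some none => some none
  | some (some open_) =>
    if w = "(" ∨ w = "select" then some (some ((w == "select") :: open_))
    else if w = ")" then
      match open_ with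
      | [] => some none
      | true :: [] => none
      | true :: _ :: t2 => some (some t2)
      | false :: t => some (some t)
    else some (some open_)

-- Pre_ excludes exactly the inputs on which A raises IndexError: a trailing clause keyword
-- (sql[idx+1] read past the end), or a where clause whose tokens drive the nesting machine
-- into the underflow state `none`.
def Pre_eval_score (sql : List String) : Prop :=
  sql.getLast?.getD "" ∉ pvKws ∧
  ∀ i < sql.length, sql.getD i "" = "where" →
    (sql.drop i).foldl pvWhereStep (some (some [])) ≠ none

instance (sql : List String) : Decidable (Pre_eval_score sql) := by
  unfold Pre_eval_score; infer_instance

def pvWitness_eval_score : List String :=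
  ["select", "a", ",", "b", "where", "x", "=", "1", "and", "y"]

def Spec_eval_score (sql : List String) (out : Int) : Prop := out = eval_score_alt sql
instance (sql : List String) (out : Int) : Decidable (Spec_eval_score sql out) := by
  unfold Spec_eval_score; infer_instance

-- ===== CLAIM (what is proved, stated in full; the proofs are below) =====
def Claim_equal_eval_score : Prop :=
  ∀ (sql : List String), Dom_eval_score sql → Pre_eval_score sql → Spec_eval_score sql (eval_score sql)


-- ===== LEMMAS AND PROOFS =====

theorem foldA_gen (sql : List String) : ∀ (l : List Nat) (acc : List Int),
    l.foldl (fun scores idx => if sql.getD idx "" ∈ pvKws then scores ++ [pvContribA sql idx] else scores) acc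
      = acc ++ (l.filter (fun i => sql.getD i "" ∈ pvKws)).map (pvContribA sql) := by
  intro l
  induction l with
  | nil => simp
  | cons x t ih =>
    intro acc
    simp only [List.foldl_cons, List.filter_cons]
    by_cases h : sql.getD x "" ∈ pvKws
    · rw [if_pos h, ih]; rw [List.getD_eq_getElem?_getD] at h; simp [h]
    · rw [if_neg h, ih]; rw [List.getD_eq_getElem?_getD] at h; simp [h]

theorem evalA_eq_sum (sql : List String) :
    eval_score sql =
      ((((List.range sql.length).filter (fun i => sql.getD i "" ∈ pvKws)).map (pvContribA sql)).sum) := by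
  unfold eval_score
  rw [foldA_gen]
  simp

theorem bal_getD (l : List String) (b : Int) (idx : Nat) (h : idx ≤ l.length) :
    ((l.scanl (fun b w => b + (if w = "(" then 1 else 0) - (if w = ")" then 1 else 0)) b).getD idx 0)
      = b + ((l.take idx).count "(" : Int) - ((l.take idx).count ")" : Int) := by
  induction l generalizing b idx with
  | nil =>
    have h0 : idx = 0 := by simpa using h
    subst h0; simp
  | cons w t ih =>
    cases idx with
    | zero => simp
    | succ k =>
      simp only [List.scanl_cons, List.getD_cons_succ, List.take_succ_cons, List.count_cons]
      rw [ih _ k (by simpa using h)]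
      push_cast
      split_ifs <;> (simp_all; try ring)

theorem comma_getD (l : List String) (b : Int) (idx : Nat) (h : idx ≤ l.length) :
    ((l.scanl (fun c w => c + (if w = "," then 1 else 0)) b).getD idx 0)
      = b + ((l.take idx).count "," : Int) := by
  induction l generalizing b idx with
  | nil =>
    have h0 : idx = 0 := by simpa using h
    subst h0; simp
  | cons w t ih =>
    cases idx with
    | zero => simp
    | succ k =>
      simp only [List.scanl_cons, List.getD_cons_succ, List.take_succ_cons, List.count_cons]
      rw [ih _ k (by simpa using h)]
      push_cast
      split_ifs <;> (simp_all; try ring)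

theorem whereLoop_mono (ws : List String) (stack : List String) (c : Int) :
    c ≤ pvWhereLoop ws stack c := by
  fun_induction pvWhereLoop ws stack c <;> (try split_ifs at *) <;> omega

theorem head_filter_ge (j : Nat) (d : Nat) :
    ∀ (K : List Nat), K.Pairwise (· < ·) → j ∈ K →
      (K.filter (fun i => j ≤ i)).headD d = j := by
  intro K
  induction K with
  | nil => simp
  | cons k t ih =>
    intro hp hm
    rcases List.pairwise_cons.mp hp with ⟨hrel, hpt⟩
    by_cases hk : j ≤ k
    · have : j = k := by
        rcases List.mem_cons.mp hm with h | h
        · exact h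
        · exact absurd (hrel j h) (by omega)
      simp [this]
    · have hjt : j ∈ t := by
        rcases List.mem_cons.mp hm with h | h
        · omega
        · exact h
      simp only [List.filter_cons]
      rw [if_neg (by simpa using hk)]
      exact ih hpt hjt

theorem filter_ge_succ (j : Nat) :
    ∀ (K : List Nat), j ∉ K →
      K.filter (fun i => j ≤ i) = K.filter (fun i => j + 1 ≤ i) := by
  intro K hj
  apply List.filter_congr
  intro i hi
  have : i ≠ j := fun h => hj (h ▸ hi)
  simp only [decide_eq_decide]
  omega

theorem nextKW_eq_aux (sql : List String) :
    ∀ (fuel j : Nat), sql.length - j ≤ fuel → j ≤ sql.length →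
      pvNextKW sql j =
        ((((List.range sql.length).filter (fun i => sql.getD i "" ∈ pvKws)).filter
          (fun i => j ≤ i)).headD sql.length) := by
  intro fuel
  induction fuel with
  | zero =>
    intro j hf hj
    have hj' : j = sql.length := by omega
    subst hj'
    rw [pvNextKW]
    rw [dif_pos (le_refl _)]
    have : (((List.range sql.length).filter (fun i => sql.getD i "" ∈ pvKws)).filter
        (fun i => sql.length ≤ i)) = [] := by
      rw [List.filter_eq_nil_iff]
      intro a ha
      have : a < sql.length := List.mem_range.mp (List.mem_of_mem_filter ha)
      simpa using (by omega : ¬ sql.length ≤ a)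
    rw [this]; rfl
  | succ m ih =>
    intro j hf hj
    by_cases hend : sql.length ≤ j
    · have hj' : j = sql.length := by omega
      subst hj'
      rw [pvNextKW, dif_pos (le_refl _)]
      have : (((List.range sql.length).filter (fun i => sql.getD i "" ∈ pvKws)).filter
          (fun i => sql.length ≤ i)) = [] := by
        rw [List.filter_eq_nil_iff]
        intro a ha
        have : a < sql.length := List.mem_range.mp (List.mem_of_mem_filter ha)
        simpa using (by omega : ¬ sql.length ≤ a)
      rw [this]; rfl
    · have hjlt : j < sql.length := by omega
      have hpair : ((List.range sql.length).filter (fun i => sql.getD i "" ∈ pvKws)).Pairwise (· < ·) :=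
        (List.pairwise_lt_range).filter _
      by_cases hkw : sql.getD j "" ∈ pvKws
      · rw [pvNextKW, dif_neg hend, if_pos (by
          have : sql[j] = sql.getD j "" := by
            simp [List.getD_eq_getElem?_getD, List.getElem?_eq_getElem hjlt]
          rw [this]; exact hkw)]
        rw [head_filter_ge _ _ _ hpair (by
          simp only [List.mem_filter, List.mem_range]
          exact ⟨hjlt, by simpa using hkw⟩)]
      · rw [pvNextKW, dif_neg hend, if_neg (by
          have : sql[j] = sql.getD j "" := by
            simp [List.getD_eq_getElem?_getD, List.getElem?_eq_getElem hjlt]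
          rw [this]; exact hkw)]
        rw [ih (j + 1) (by omega) (by omega)]
        rw [← filter_ge_succ j _ (by
          simp only [List.mem_filter, List.mem_range]
          rintro ⟨-, hm⟩
          exact hkw (by simpa using hm))]

theorem nextKW_eq (sql : List String) (j : Nat) (h : j ≤ sql.length) :
    pvNextKW sql j =
      ((((List.range sql.length).filter (fun i => sql.getD i "" ∈ pvKws)).filter
        (fun i => j ≤ i)).headD sql.length) :=
  nextKW_eq_aux sql (sql.length - j) j (le_refl _) h

theorem foldl_whereStep_none (l : List String) : l.foldl pvWhereStep none = none := by
  induction l with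
  | nil => rfl
  | cons w rest ih => simp [List.foldl_cons, pvWhereStep, ih]

theorem whereLoop_complex (ws : List String) :
    ∀ (stack : List String) (c : Int), (∀ s ∈ stack, s = "(" ∨ s = "select") →
      ws.foldl pvWhereStep (some (some (stack.map (fun s => s == "select")))) ≠ none →
      (pvWhereComplex ws stack = false → pvWhereLoop ws stack c = c) ∧
      (pvWhereComplex ws stack = true → c < pvWhereLoop ws stack c) := by
  induction ws with
  | nil =>
    intro stack c _ _
    refine ⟨fun _ => rfl, fun h => ?_⟩
    simp [pvWhereComplex] at h
  | cons w rest ih =>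
    intro stack c hinv hcrash
    by_cases hlp : w = "("
    · subst hlp
      simp only [List.foldl_cons, pvWhereStep] at hcrash
      simp only [pvWhereLoop, pvWhereComplex]
      simp at hcrash ⊢
      refine ih _ c ?_ (by simpa using hcrash)
      intro s hs
      rcases List.mem_cons.mp hs with rfl | hs
      · exact Or.inl rfl
      · exact hinv s hs
    · by_cases hsel : w = "select"
      · subst hsel
        simp only [List.foldl_cons, pvWhereStep] at hcrash
        simp only [pvWhereLoop, pvWhereComplex]
        simp at hcrash ⊢
        refine ih _ c ?_ (by simpa using hcrash)
        intro s hs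
        rcases List.mem_cons.mp hs with rfl | hs
        · exact Or.inr rfl
        · exact hinv s hs
      · by_cases hrp : w = ")"
        · subst hrp
          have hne : ¬ ((")" : String) = "(" ∨ (")" : String) = "select") := by simp
          simp only [List.foldl_cons, pvWhereStep, if_neg hne] at hcrash
          simp only [pvWhereLoop, pvWhereComplex]
          simp [hlp] at ⊢
          match stack, hinv, hcrash with
          | [], _, _ => exact ⟨fun _ => rfl, by simp⟩
          | top :: t, hinv, hcrash =>
            rcases hinv top (by simp) with htop | htop
            · subst htop
              simp at hcrash ⊢
              exact ih t c (fun s hs => hinv s (by simp [hs])) (by simpa using hcrash)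
            · subst htop
              match t, hcrash with
              | [], hcrash =>
                simp [foldl_whereStep_none] at hcrash
              | t0 :: t2, hcrash =>
                simp at hcrash ⊢
                exact ih t2 c (fun s hs => hinv s (by simp [hs])) (by simpa using hcrash)
        · by_cases hao : w = "and" ∨ w = "or"
          · have hne : ¬ (w = "(" ∨ w = "select") := by tauto
            simp only [List.foldl_cons, pvWhereStep, if_neg hne, if_neg hrp] at hcrash
            simp only [pvWhereLoop, pvWhereComplex]
            simp [hlp, hsel, hrp, hao] at ⊢
            by_cases hst : stack = []
            · subst hst
              simp
              have := whereLoop_mono rest [] (c + 1)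
              omega
            · simp [hst]
              exact ih stack c hinv hcrash
          · have hne : ¬ (w = "(" ∨ w = "select") := by tauto
            simp only [List.foldl_cons, pvWhereStep, if_neg hne, if_neg hrp] at hcrash
            simp only [pvWhereLoop, pvWhereComplex]
            simp [hlp, hsel, hrp, hao] at ⊢
            exact ih stack c hinv hcrash

theorem contrib_eq (sql : List String) (idx nxt : Nat)
    (hidx : idx < sql.length) (hlt : idx < nxt) (hle : nxt ≤ sql.length)
    (hnext : pvNextKW sql (idx + 1) = nxt)
    (hpre : sql.getD idx "" = "where" → (sql.drop idx).foldl pvWhereStep (some (some [])) ≠ none) :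
    pvContribA sql idx =
      pvContribB sql
        (sql.scanl (fun b w => b + (if w = "(" then 1 else 0) - (if w = ")" then 1 else 0)) 0)
        (sql.scanl (fun c w => c + (if w = "," then 1 else 0)) 0) (idx, nxt) := by
  unfold pvContribA pvContribB
  simp only [hnext]
  rw [bal_getD sql 0 idx (le_of_lt hidx), comma_getD sql 0 idx (le_of_lt hidx),
    comma_getD sql 0 nxt hle]
  have hlayer :
      (if (((sql.take idx).count "(" : Int) - ((sql.take idx).count ")" : Int) + 1 > 5) then (5 : Int)
        else ((sql.take idx).count "(" : Int) - ((sql.take idx).count ")" : Int) + 1)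
      = min (0 + ((sql.take idx).count "(" : Int) - ((sql.take idx).count ")" : Int) + 1) 5 := by
    split_ifs <;> omega
  rw [hlayer]
  by_cases hw : sql.getD idx "" = "where"
  · rw [if_neg (not_not_intro hw), if_neg (not_not_intro hw)]
    rcases whereLoop_complex (sql.drop idx) [] 1 (by simp) (by simpa using hpre hw) with ⟨h0, h1⟩
    cases hc : pvWhereComplex (sql.drop idx) [] with
    | false => rw [h0 hc]; simp
    | true =>
      have := h1 hc
      rw [if_pos (by omega)]
      simp
  · rw [if_pos hw, if_pos hw]
    congr 1
    have htk : sql.take nxt = sql.take idx ++ (sql.drop idx).take (nxt - idx) := by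
      conv_lhs => rw [show nxt = idx + (nxt - idx) by omega]
      rw [List.take_add]
    rw [htk, List.count_append]
    simp only [decide_eq_true_eq]
    split_ifs <;> push_cast at * <;> omega

theorem foldB_eq (sql : List String)
    (hpre : ∀ i < sql.length, sql.getD i "" = "where" → (sql.drop i).foldl pvWhereStep (some (some [])) ≠ none) :
    ∀ (K₂ K₁ : List Nat) (acc : Int),
      ((List.range sql.length).filter (fun i => sql.getD i "" ∈ pvKws)) = K₁ ++ K₂ →
      ((K₂.zip (K₂.tail ++ [sql.length])).foldl
          (fun total q => total + pvContribB sql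
            (sql.scanl (fun b w => b + (if w = "(" then 1 else 0) - (if w = ")" then 1 else 0)) 0)
            (sql.scanl (fun c w => c + (if w = "," then 1 else 0)) 0) q) acc)
        = acc + (K₂.map (pvContribA sql)).sum := by
  intro K₂
  induction K₂ with
  | nil => intro K₁ acc _; simp
  | cons k t ih =>
    intro K₁ acc hK
    have hpair : (K₁ ++ k :: t).Pairwise (· < ·) := by
      rw [← hK]; exact List.pairwise_lt_range.filter _
    have hmemK : ∀ i ∈ K₁ ++ k :: t, i < sql.length ∧ sql.getD i "" ∈ pvKws := by
      intro i hi
      rw [← hK] at hi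
      exact ⟨List.mem_range.mp (List.mem_of_mem_filter hi), by simpa using List.of_mem_filter hi⟩
    have hk_lt : k < sql.length := (hmemK k (by simp)).1
    have hpa := List.pairwise_append.mp hpair
    have hkt := List.pairwise_cons.mp hpa.2.1
    have hfilt : (((List.range sql.length).filter (fun i => sql.getD i "" ∈ pvKws)).filter
        (fun i => k + 1 ≤ i)) = t := by
      rw [hK, List.filter_append, List.filter_cons]
      have h1 : K₁.filter (fun i => k + 1 ≤ i) = [] := by
        rw [List.filter_eq_nil_iff]
        intro a ha
        have := hpa.2.2 a ha k (by simp)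
        simpa using (by omega : ¬ (k + 1 ≤ a))
      have h2 : t.filter (fun i => k + 1 ≤ i) = t := by
        rw [List.filter_eq_self]
        intro a ha
        have := hkt.1 a ha
        simpa using (by omega : k + 1 ≤ a)
      rw [h1, if_neg (by simp), h2]
      simp
    have hnext : pvNextKW sql (k + 1) = (t.headD sql.length) := by
      rw [nextKW_eq sql (k + 1) (by omega), hfilt]
    cases t with
    | nil =>
      have hc := contrib_eq sql k sql.length hk_lt (by omega) (le_refl _)
        (by simpa using hnext) (fun hw => hpre k hk_lt hw)
      simp [hc]
    | cons t0 t' =>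
      have ht0 : t0 < sql.length := (hmemK t0 (by simp)).1
      have hc := contrib_eq sql k t0 hk_lt (hkt.1 t0 (by simp)) (le_of_lt ht0)
        (by simpa using hnext) (fun hw => hpre k hk_lt hw)
      have hzip : ((k :: t0 :: t').zip ((k :: t0 :: t').tail ++ [sql.length]))
          = (k, t0) :: ((t0 :: t').zip ((t0 :: t').tail ++ [sql.length])) := by
        simp [List.zip_cons_cons]
      rw [hzip, List.foldl_cons]
      rw [ih (K₁ ++ [k]) _ (by rw [hK, List.append_assoc]; rfl)]
      rw [← hc]
      simp only [List.map_cons, List.sum_cons]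
      omega

-- ===== VERDICT (by name: the statement is the Claim_ definition above) =====
theorem eval_score_spec : Claim_equal_eval_score := by
  intro sql _ hpre
  unfold Spec_eval_score
  rw [evalA_eq_sum]
  simp only [eval_score_alt]
  rw [foldB_eq sql hpre.2 _ [] 0 rfl]
  simp
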